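-- pv_equiv track=rewrite | github.com/darkmushroom/excel_rate_to_JSON | reducer.py | reduce_it
-- ===== SOURCE A (Python) =====
-- def reduce_it(parse, size = -1):
--   # this is our first iteration
--   if size == -1:
--     size = len(parse[0])
--
--   # cannot reduce any further
--   if size == 0:
--     return parse
--
--   length = len(parse)
--   output = []
--
--   i = 0
--   # loop through each element in parse
--   while i < length:
--     is_contiguous = False
--
--     # if the last character is a 0, we may be able to reduce
--     if parse[i][-1:] == '0' and i+9 <= length:
--       # start here and loop through the next 9 items to see if they are contiguous and correctly sized
--       for j in range(0, 9):
--         if parse[i + j][-1:] == str(j) and not len(parse[i + j]) > size: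
--           is_contiguous = True
--         else:
--           is_contiguous = False
--           break
--
--     if is_contiguous:
--       output.append(parse[i][:-1])
--       i += 9
--     else:
--       output.append(parse[i])
--
--     i += 1
--
--   return reduce_it(output, size-1)
-- ===== SOURCE B (Python) =====
-- def reduce_it(parse, size=-1):
--     # iterative fixed-point version: explicit loop over the shrinking size,
--     # with an early exit as soon as a pass collapses nothing (further passes
--     # are then the identity, so the result is unchanged).
--     if size == -1:
--         size = len(parse[0])
--     new = parse
--     while size > 0:
--         out = []
--         changed = False
--         i, n = 0, len(new)
--         while i < n:
--             if (new[i][-1:] == '0' and i + 9 <= n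
--                     and all(new[i + j][-1:] == str(j) and len(new[i + j]) <= size
--                             for j in range(9))):
--                 out.append(new[i][:-1])
--                 i += 10
--                 changed = True
--             else:
--                 out.append(new[i])
--                 i += 1
--         new = out
--         size -= 1
--         if not changed:
--             break
--     return new
-- ===== Notes on version B (the rewrite author's own statement) =====
-- stated objective: faster
-- what changed: Tail recursion over the shrinking size becomes an explicit while loop whose pass is a single all()-predicate scan with a changed flag and an early fixed-point exit: once a pass collapses nothing, further passes are identity, so B stops after at most (#collapses+1) passes instead of A's full size recursion.
-- outside the precondition, e.g. on reduce_it(['a'], 901): A returns ['a'], B returns ['a']; on reduce_it(['a0'], -2): A raises RecursionError, B returns ['a0']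
import Mathlib
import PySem

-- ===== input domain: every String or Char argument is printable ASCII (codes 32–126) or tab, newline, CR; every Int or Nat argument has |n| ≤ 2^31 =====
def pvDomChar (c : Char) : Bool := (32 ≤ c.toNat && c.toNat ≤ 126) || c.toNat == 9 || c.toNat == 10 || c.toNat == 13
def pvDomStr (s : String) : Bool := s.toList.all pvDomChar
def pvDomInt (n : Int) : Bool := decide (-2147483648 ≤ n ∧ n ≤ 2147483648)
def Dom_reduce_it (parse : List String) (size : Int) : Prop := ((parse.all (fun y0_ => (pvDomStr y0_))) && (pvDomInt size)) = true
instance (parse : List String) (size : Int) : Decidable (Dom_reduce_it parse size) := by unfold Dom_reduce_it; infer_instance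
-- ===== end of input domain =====

-- B rewrites A's tail recursion as an explicit loop over the shrinking size with a
-- single all()-predicate pass and an early exit once a pass collapses nothing, so B
-- runs at most (#collapses+1) passes where A always runs `size` passes (faster).

-- ===== PORT A =====
-- the inner 'for j in range(0,9)' with the is_contiguous flag and break, literally:
-- flag starts False; each success sets it True, a failure returns False at once.
def contigA (parse : List String) (size : Int) (i : Nat) : List Int → Bool → Bool
  | [], flag => flag
  | j :: js, flag =>
      if (PySem.Str.slice (PySem.List.pyGetD parse ((i : Int) + j) "") (some (-1)) none == PySem.Int.toStr j)
          && !(decide (PySem.Str.len (PySem.List.pyGetD parse ((i : Int) + j) "") > size))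
      then contigA parse size i js true
      else false
  -- '_' pattern for flag kept explicit; break = immediate false

-- the 'while i < length' loop of A: collapse branch appends parse[i][:-1] and does
-- i += 9; i += 1; the other branch appends parse[i] and does i += 1.
def scanA (parse : List String) (size : Int) (i : Nat) : List String :=
  if _h : i < parse.length then
    let isc := (PySem.Str.slice (PySem.List.pyGetD parse (i : Int) "") (some (-1)) none == "0")
               && decide ((i : Int) + 9 ≤ PySem.List.len parse)
               && contigA parse size i (PySem.List.pyRange 0 9 1) false
    if isc then
      PySem.Str.slice (PySem.List.pyGetD parse (i : Int) "") none (some (-1)) :: scanA parse size (i + 10)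
    else
      PySem.List.pyGetD parse (i : Int) "" :: scanA parse size (i + 1)
  else []
termination_by parse.length - i

-- the recursion 'return reduce_it(output, size-1)'; size = -1 cannot recur (handled
-- at entry), and size < 0 diverges in Python (excluded by Pre_), here returns parse.
def reduceA (parse : List String) (size : Int) : List String :=
  if size == 0 then parse
  else if size < 0 then parse
  else reduceA (scanA parse size 0) (size - 1)
termination_by size.toNat
decreasing_by simp_all; omega

def reduce_it (parse : List String) (size : Int) : List String :=
  -- 'if size == -1: size = len(parse[0])' — parse[0] raises IndexError on [], outside Pre_
  let size1 := if size == -1 then PySem.Str.len (PySem.List.pyGetD parse 0 "") else size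
  reduceA parse size1

-- ===== PORT B =====
-- B's run test: one conjunction with an all() over range(9)
def condB (parse : List String) (size : Int) (i : Nat) : Bool :=
  (PySem.Str.slice (PySem.List.pyGetD parse (i : Int) "") (some (-1)) none == "0")
  && decide ((i : Int) + 9 ≤ PySem.List.len parse)
  && (PySem.List.pyRange 0 9 1).all (fun j =>
       (PySem.Str.slice (PySem.List.pyGetD parse ((i : Int) + j) "") (some (-1)) none == PySem.Int.toStr j)
       && decide (PySem.Str.len (PySem.List.pyGetD parse ((i : Int) + j) "") ≤ size))

-- B's inner while loop, tail-recursively with the (out, changed) accumulator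
def passB (parse : List String) (size : Int) (i : Nat) (out : List String) (changed : Bool) :
    List String × Bool :=
  if _h : i < parse.length then
    if condB parse size i then
      passB parse size (i + 10)
        (PySem.Str.slice (PySem.List.pyGetD parse (i : Int) "") none (some (-1)) :: out) true
    else
      passB parse size (i + 1) (PySem.List.pyGetD parse (i : Int) "" :: out) changed
  else (out.reverse, changed)
termination_by parse.length - i

-- B's outer 'while size > 0' loop with the early break when nothing changed
def loopB (parse : List String) (size : Int) : List String :=
  if _h : size > 0 then
    let r := passB parse size 0 [] false
    if r.2 then loopB r.1 (size - 1) else r.1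
  else parse
termination_by size.toNat
decreasing_by omega

def reduce_it_alt (parse : List String) (size : Int) : List String :=
  let size1 := if size == -1 then PySem.Str.len (PySem.List.pyGetD parse 0 "") else size
  loopB parse size1

-- ===== PRECONDITION & SPEC =====
-- Pre_ excludes: parse = [] with size = -1 (A raises IndexError); size < -1 (A recurses
-- forever, RecursionError); and sizes (resp. len(parse[0]) for size = -1) above 900, where
-- A's recursion depth = size exceeds CPython's recursion limit and A raises RecursionError
-- (900 is conservative, so A still returns on some excluded sizes just below the limit).
def Pre_reduce_it (parse : List String) (size : Int) : Prop :=
  (0 ≤ size ∧ size ≤ 900) ∨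
  (size = -1 ∧ parse ≠ [] ∧ PySem.Str.len (parse.headD "") ≤ 900)
instance (parse : List String) (size : Int) : Decidable (Pre_reduce_it parse size) := by
  unfold Pre_reduce_it; infer_instance

def pvWitness_reduce_it : List String × Int :=
  (["b0", "b1", "b2", "b3", "b4", "b5", "b6", "b7", "b8", "b9"], 2)

def Spec_reduce_it (parse : List String) (size : Int) (out : List String) : Prop :=
  out = reduce_it_alt parse size
instance (parse : List String) (size : Int) (out : List String) : Decidable (Spec_reduce_it parse size out) := by
  unfold Spec_reduce_it; infer_instance

-- ===== CLAIM (what is proved, stated in full; the proofs are below) =====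
def Claim_equal_reduce_it : Prop := ∀ (parse : List String) (size : Int),
  Dom_reduce_it parse size → Pre_reduce_it parse size →
  Spec_reduce_it parse size (reduce_it parse size)

-- ===== LEMMAS AND PROOFS =====

theorem contigA_cons (parse : List String) (size : Int) (i : Nat) (j : Int) (js : List Int) (flag : Bool) :
    contigA parse size i (j :: js) flag =
      if (PySem.Str.slice (PySem.List.pyGetD parse ((i : Int) + j) "") (some (-1)) none == PySem.Int.toStr j)
          && !(decide (PySem.Str.len (PySem.List.pyGetD parse ((i : Int) + j) "") > size))
      then contigA parse size i js true else false := rfl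

theorem notdec_gt (x s : Int) : (!decide (x > s)) = decide (x ≤ s) := by
  simp [← decide_not]

theorem contigA_true (parse : List String) (size : Int) (i : Nat) (l : List Int) :
    contigA parse size i l true = l.all (fun j =>
      (PySem.Str.slice (PySem.List.pyGetD parse ((i : Int) + j) "") (some (-1)) none == PySem.Int.toStr j)
      && decide (PySem.Str.len (PySem.List.pyGetD parse ((i : Int) + j) "") ≤ size)) := by
  induction l with
  | nil => simp [contigA]
  | cons j js ih =>
    rw [contigA_cons, notdec_gt, List.all_cons, ih]
    cases hP : ((PySem.Str.slice (PySem.List.pyGetD parse ((i : Int) + j) "") (some (-1)) none == PySem.Int.toStr j)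
        && decide (PySem.Str.len (PySem.List.pyGetD parse ((i : Int) + j) "") ≤ size)) <;> simp [hP]

-- A's guarded flag-loop equals B's single predicate
theorem cond_eq (parse : List String) (size : Int) (i : Nat) :
    ((PySem.Str.slice (PySem.List.pyGetD parse (i : Int) "") (some (-1)) none == "0")
      && decide ((i : Int) + 9 ≤ PySem.List.len parse)
      && contigA parse size i (PySem.List.pyRange 0 9 1) false) = condB parse size i := by
  have hr : PySem.List.pyRange (0 : Int) 9 1 = ([0, 1, 2, 3, 4, 5, 6, 7, 8] : List Int) := by decide
  unfold condB
  rw [hr, contigA_cons, notdec_gt, contigA_true]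
  conv_rhs => rw [List.all_cons]
  cases hP : ((PySem.Str.slice (PySem.List.pyGetD parse ((i : Int) + 0) "") (some (-1)) none == PySem.Int.toStr 0)
      && decide (PySem.Str.len (PySem.List.pyGetD parse ((i : Int) + 0) "") ≤ size))
  · rw [if_neg (by simp), Bool.false_and]
  · rw [if_pos rfl, Bool.true_and]

-- the changed flag B computes, as a standalone recursion
def chgB (parse : List String) (size : Int) (i : Nat) : Bool :=
  if _h : i < parse.length then
    if condB parse size i then true else chgB parse size (i + 1)
  else false
termination_by parse.length - i

theorem passB_eq (parse : List String) (size : Int) :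
    ∀ i out changed, passB parse size i out changed =
      (out.reverse ++ scanA parse size i, changed || chgB parse size i) := by
  suffices H : ∀ n i out changed, parse.length - i ≤ n → passB parse size i out changed =
      (out.reverse ++ scanA parse size i, changed || chgB parse size i) by
    intro i out changed; exact H (parse.length - i) i out changed le_rfl
  intro n
  induction n with
  | zero =>
    intro i out changed h0
    have h : ¬ i < parse.length := by omega
    unfold passB scanA chgB
    simp only [dif_neg h]
    simp
  | succ n ihn =>
    intro i out changed hle
    unfold passB scanA chgB
    by_cases h : i < parse.length
    · rw [dif_pos h]
      rw [cond_eq]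
      by_cases hc : condB parse size i = true
      · simp only [hc, if_pos]
        rw [ihn (i + 10) _ _ (by omega)]
        simp [h]
      · simp only [hc, Bool.false_eq_true, if_neg, if_false]
        rw [ihn (i + 1) _ _ (by omega)]
        simp [h]
    · unfold scanA chgB
      simp only [dif_neg h]
      simp

theorem chgB_all_false (parse : List String) (size : Int) :
    ∀ i, chgB parse size i = false ↔ ∀ k, i ≤ k → k < parse.length → condB parse size k = false := by
  suffices H : ∀ n i, parse.length - i ≤ n → (chgB parse size i = false ↔
      ∀ k, i ≤ k → k < parse.length → condB parse size k = false) by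
    intro i; exact H (parse.length - i) i le_rfl
  intro n
  induction n with
  | zero =>
    intro i h0
    have h : ¬ i < parse.length := by omega
    unfold chgB
    rw [dif_neg h]
    constructor
    · intro _ k hik hk; omega
    · intro _; rfl
  | succ n ihn =>
    intro i hle
    unfold chgB
    by_cases h : i < parse.length
    · rw [dif_pos h]
      by_cases hc : condB parse size i = true
      · simp only [hc, if_pos]
        constructor
        · intro hfalse; exact absurd hfalse (by simp)
        · intro hall; exact absurd (hall i le_rfl h) (by simp [hc])
      · simp only [hc, Bool.false_eq_true, if_neg, if_false]
        rw [ihn (i + 1) (by omega)]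
        constructor
        · intro hall k hik hk
          rcases Nat.eq_or_lt_of_le hik with rfl | hlt
          · simpa using hc
          · exact hall k hlt hk
        · intro hall k hik hk; exact hall k (by omega) hk
    · rw [dif_neg h]
      constructor
      · intro _ k hik hk; omega
      · intro _; rfl

theorem condB_mono (parse : List String) (s s' : Int) (i : Nat) (hs : s' ≤ s) :
    condB parse s i = false → condB parse s' i = false := by
  unfold condB
  intro h
  rcases Bool.eq_false_or_eq_true ((PySem.Str.slice (PySem.List.pyGetD parse (i : Int) "") (some (-1)) none == "0")
      && decide ((i : Int) + 9 ≤ PySem.List.len parse)) with h1 | h1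
  · rw [h1, Bool.true_and] at h ⊢
    rcases (List.all_eq_false).mp h with ⟨j, hj, hjf⟩
    refine (List.all_eq_false).mpr ⟨j, hj, ?_⟩
    rcases Bool.eq_false_or_eq_true (PySem.Str.slice (PySem.List.pyGetD parse ((i : Int) + j) "") (some (-1)) none == PySem.Int.toStr j) with h2 | h2
    · rw [h2, Bool.true_and] at hjf ⊢
      simp only [decide_eq_true_eq] at hjf ⊢
      omega
    · rw [h2, Bool.false_and]
      simp
  · rw [h1, Bool.false_and]

theorem scanA_id (parse : List String) (size : Int)
    (hall : ∀ k, k < parse.length → condB parse size k = false) :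
    ∀ i, scanA parse size i = parse.drop i := by
  suffices H : ∀ n i, parse.length - i ≤ n → scanA parse size i = parse.drop i by
    intro i; exact H (parse.length - i) i le_rfl
  intro n
  induction n with
  | zero =>
    intro i h0
    have h : ¬ i < parse.length := by omega
    unfold scanA
    rw [dif_neg h, List.drop_eq_nil_of_le (by omega)]
  | succ n ihn =>
    intro i hle
    unfold scanA
    by_cases h : i < parse.length
    · rw [dif_pos h]
      rw [cond_eq]
      simp only [hall i h, Bool.false_eq_true, if_neg, if_false]
      rw [ihn (i + 1) (by omega)]
      have hg : PySem.List.pyGetD parse (i : Int) "" = parse[i] := by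
        simp [List.getD, List.getElem?_eq_getElem h]
      rw [hg, List.drop_eq_getElem_cons h]
    · rw [dif_neg h, List.drop_eq_nil_of_le (by omega)]

theorem reduceA_id (parse : List String) (s : Int)
    (hall : ∀ k, k < parse.length → condB parse s k = false) :
    ∀ s', 0 ≤ s' → s' ≤ s → reduceA parse s' = parse := by
  intro s'
  induction s' using Int.induction_on with
  | zero => intro _ _; unfold reduceA; simp
  | succ n ihn =>
    intro _ hle
    unfold reduceA
    have h1 : ¬((n : Int) + 1 == 0) = true := by simp; omega
    have h2 : ¬((n : Int) + 1 < 0) := by omega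
    simp only [h1, h2, if_neg, if_false]
    have hall' : ∀ k, k < parse.length → condB parse ((n : Int) + 1) k = false := fun k hk =>
      condB_mono parse s ((n : Int) + 1) k hle (hall k hk)
    rw [scanA_id parse ((n : Int) + 1) hall' 0, List.drop_zero]
    rw [show ((n : Int) + 1 - 1) = (n : Int) from by ring]
    exact ihn (by omega) (by omega)
  | pred n _ => intro h _; omega

theorem reduceA_eq_loopB : ∀ (size : Int) (parse : List String),
    reduceA parse size = loopB parse size := by
  intro size
  induction size using Int.induction_on with
  | zero => intro parse; unfold reduceA loopB; simp
  | succ n ihn =>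
    intro parse
    unfold reduceA loopB
    have h0 : ¬((n : Int) + 1 == 0) = true := by simp; omega
    have h1 : ¬((n : Int) + 1 < 0) := by omega
    have h2 : (n : Int) + 1 > 0 := by omega
    simp only [h0, h1, h2, if_neg, if_false, dif_pos]
    rw [passB_eq]
    simp only [List.reverse_nil, List.nil_append, Bool.false_or]
    by_cases hc : chgB parse ((n : Int) + 1) 0 = true
    · simp only [hc, if_pos]
      have := ihn (scanA parse ((n : Int) + 1) 0)
      simpa using this
    · simp only [Bool.not_eq_true] at hc
      simp only [hc, Bool.false_eq_true, if_neg, if_false]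
      have hall : ∀ k, k < parse.length → condB parse ((n : Int) + 1) k = false := by
        intro k hk
        exact ((chgB_all_false parse ((n : Int) + 1) 0).mp hc) k (by omega) hk
      have hsc : scanA parse ((n : Int) + 1) 0 = parse := by
        rw [scanA_id parse ((n : Int) + 1) hall 0, List.drop_zero]
      rw [hsc, show ((n : Int) + 1 - 1) = (n : Int) from by ring]
      exact reduceA_id parse ((n : Int) + 1) hall (n : Int) (by omega) (by omega)
  | pred n ihn =>
    intro parse
    unfold reduceA loopB
    by_cases h : (-(n : Int) - 1) = 0
    · simp [h]
    · have h1 : (-(n : Int) - 1) < 0 := by omega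
      have h2 : ¬((-(n : Int) - 1) > 0) := by omega
      rw [if_neg (by simpa using h), if_pos h1, dif_neg h2]

-- ===== VERDICT (by name: the statement is the Claim_ definition above) =====
theorem reduce_it_spec : Claim_equal_reduce_it := by
  intro parse size _ _
  unfold Spec_reduce_it reduce_it reduce_it_alt
  exact reduceA_eq_loopB _ _
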